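-- pv_equiv track=rewrite | github.com/brionydunbar/coding-challenges | array_combinations.py | solve
-- ===== SOURCE A (Python) =====
-- def solve(arr):
--     unique_arrays = set() # set to store each unique array combination as a tuple (hashable)
--     n = len(arr) # n as number of subarrays
--     indices = [0] * n # list of pointers, will tell us which element we are currently picking from subarray i
--
--     # calculate total number of possible arrays including duplicates
--     count = 1
--     for a in arr:
--         count *= len(a) # multiplies the count by the length of each subarray
--
--     # iterate to generate combinations
--     for _ in range(count):
--         current_array = [] # builds current array by picking indices[i] from subarray[i]
--         for i in range(n):
--             current_array.append(arr[i][indices[i]])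
--         unique_arrays.add(tuple(current_array)) # convert to tuple be hashable and puts into unique_arrays set to eliminate duplicates
--
--         # increment indices to move to next combination
--         for i in range(n - 1, -1, -1): # for each position i from right to left
--             indices[i] += 1 # try to increment it
--             if indices[i] < len(arr[i]): # if the position exceeds subarray length, reset to 0 and continue to next left position
--                 break
--             else:
--                 indices[i] = 0
--
--     return  len(unique_arrays) # return the unique count
-- ===== SOURCE B (Python) =====
-- def solve(arr):
--     result = 1
--     for a in arr:
--         result *= len(set(a))
--     return result
-- ===== Notes on version B (the rewrite author's own statement) =====
-- stated objective: alternative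
-- what changed: Replaces the odometer enumeration of the whole Cartesian product (materialising every tuple in a set) by the closed-form product of the number of distinct elements of each subarray.
import Mathlib
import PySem

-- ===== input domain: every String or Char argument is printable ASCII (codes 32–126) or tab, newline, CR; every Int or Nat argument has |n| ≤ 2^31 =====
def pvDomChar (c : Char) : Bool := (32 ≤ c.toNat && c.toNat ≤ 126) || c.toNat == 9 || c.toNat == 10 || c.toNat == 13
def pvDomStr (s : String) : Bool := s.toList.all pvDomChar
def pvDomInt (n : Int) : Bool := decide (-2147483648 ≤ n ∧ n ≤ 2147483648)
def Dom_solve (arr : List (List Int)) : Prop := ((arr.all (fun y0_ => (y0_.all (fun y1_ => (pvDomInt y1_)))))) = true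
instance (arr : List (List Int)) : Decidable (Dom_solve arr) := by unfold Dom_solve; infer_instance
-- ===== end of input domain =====

-- B replaces A's odometer enumeration of the whole Cartesian product by the product of the
-- per-subarray distinct-element counts (objective: alternative algorithm, closed form instead of
-- enumeration; return-value equivalence is what is proved).

-- ===== PORT A =====
-- the 'for i in range(n-1,-1,-1): indices[i] += 1; if … break else indices[i] = 0' loop of A
-- (arr[i] / indices[i] are in range whenever this runs, so the pyGetD/pySetD defaults are never used — exact)
def incGo (arr : List (List Int)) : List Int → List Int → List Int
  | [], idx => idx
  | i :: rest, idx =>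
    let idx' := PySem.List.pySetD idx i (PySem.List.pyGetD idx i 0 + 1)
    if PySem.List.pyGetD idx' i 0 < PySem.List.len (PySem.List.pyGetD arr i []) then idx'
    else incGo arr rest (PySem.List.pySetD idx' i 0)

def solve (arr : List (List Int)) : Int :=
  let n := arr.length
  let indices : List Int := List.replicate n 0
  let count : Int := arr.foldl (fun c a => c * PySem.List.len a) 1
  let final := (PySem.List.pyRange 0 count 1).foldl
    (fun (st : PySem.Set (List Int) × List Int) _ =>
      let cur := (PySem.List.pyRange 0 (n : Int) 1).foldl
        (fun cur i => cur ++ [PySem.List.pyGetD (PySem.List.pyGetD arr i []) (PySem.List.pyGetD st.2 i 0) 0]) []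
      (PySem.Set.add st.1 cur, incGo arr (PySem.List.pyRange ((n : Int) - 1) (-1) (-1)) st.2))
    ((PySem.Set.empty : PySem.Set (List Int)), indices)
  (final.1.length : Int)

-- ===== PORT B =====
def solve_alt (arr : List (List Int)) : Int :=
  arr.foldl (fun result a => result * PySem.Set.len (PySem.Set.ofList a)) 1

-- ===== PRECONDITION & SPEC =====
def Spec_solve (arr : List (List Int)) (out : Int) : Prop := out = solve_alt arr
instance (arr : List (List Int)) (out : Int) : Decidable (Spec_solve arr out) := by unfold Spec_solve; infer_instance

-- ===== CLAIM (what is proved, stated in full; the proofs are below) =====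
def Claim_equal_solve : Prop := ∀ (arr : List (List Int)), Dom_solve arr → Spec_solve arr (solve arr)

-- ===== LEMMAS AND PROOFS =====

-- total number of combinations (with duplicates), as a natural number
def Cn (arr : List (List Int)) : Nat := (arr.map List.length).prod

-- the odometer state after k steps: mixed-radix digits of k, most significant first
def decodeN : List (List Int) → Nat → List Nat
  | [], _ => []
  | a :: rest, k => (k / Cn rest) % a.length :: decodeN rest (k % Cn rest)

-- the tuple produced from a digit list
def tupA (arr : List (List Int)) (k : Nat) : List Int :=
  List.zipWith (fun a j => a.getD j 0) arr (decodeN arr k)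

-- the full product list, head-first
def prodL : List (List Int) → List (List Int)
  | [] => [[]]
  | a :: rest => a.flatMap (fun x => (prodL rest).map (x :: ·))

-- structural carry-increment: returns new digits and the carry-out flag
def carryInc : List (List Int) → List Int → List Int × Bool
  | [], _ => ([], true)
  | a :: rest, idx =>
    match idx with
    | [] => ([], true)
    | j :: js =>
      let r := carryInc rest js
      if r.2 then
        if j + 1 < PySem.List.len a then ((j + 1) :: r.1, false) else ((0 : Int) :: r.1, true)
      else (j :: r.1, false)

-- mirror of incGo that also reports whether the loop exhausted its positions (true) or broke (false)
def incGoB (arr : List (List Int)) : List Int → List Int → List Int × Bool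
  | [], idx => (idx, true)
  | i :: rest, idx =>
    let idx' := PySem.List.pySetD idx i (PySem.List.pyGetD idx i 0 + 1)
    if PySem.List.pyGetD idx' i 0 < PySem.List.len (PySem.List.pyGetD arr i []) then (idx', false)
    else incGoB arr rest (PySem.List.pySetD idx' i 0)

theorem incGo_eq_fst (arr : List (List Int)) (ps idx : List Int) :
    incGo arr ps idx = (incGoB arr ps idx).1 := by
  induction ps generalizing idx with
  | nil => rfl
  | cons i rest ih =>
    simp only [incGo, incGoB]
    split_ifs <;> simp [ih]

theorem incGoB_append (arr : List (List Int)) (ps qs idx : List Int) :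
    incGoB arr (ps ++ qs) idx =
      (let r := incGoB arr ps idx; if r.2 then incGoB arr qs r.1 else r) := by
  induction ps generalizing idx with
  | nil => rfl
  | cons i rest ih =>
    simp only [List.cons_append, incGoB]
    by_cases h : PySem.List.pyGetD (PySem.List.pySetD idx i (PySem.List.pyGetD idx i 0 + 1)) i 0 <
        PySem.List.len (PySem.List.pyGetD arr i [])
    · simp only [if_pos h]
      rfl
    · simp only [if_neg h]
      exact ih _

theorem incGoB_shift (a : List Int) (rest : List (List Int)) (ps : List Nat) (j : Int) (js : List Int) :
    incGoB (a :: rest) (ps.map (fun k => ((k + 1 : Nat) : Int))) (j :: js) =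
      ((j :: (incGoB rest (ps.map (fun (k : Nat) => (k : Int))) js).1),
        (incGoB rest (ps.map (fun (k : Nat) => (k : Int))) js).2) := by
  induction ps generalizing js with
  | nil => simp [incGoB]
  | cons k ks ih =>
    simp only [List.map_cons, incGoB, PySem.List.pyGetD_natCast, PySem.List.pySetD_natCast,
      List.getD_cons_succ, List.set_cons_succ, PySem.List.len]
    split_ifs with h
    · rfl
    · exact ih _

theorem revRange (n : Nat) :
    PySem.List.pyRange ((n : Int) - 1) (-1) (-1) = ((List.range n).reverse).map (fun (k : Nat) => (k : Int)) := by
  cases n with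
  | zero => simp [PySem.List.pyRange]
  | succ m =>
    have hcond : ((-1 : Int) < (m + 1 : Nat) - 1) := by push_cast; omega
    have hcount : ((((m + 1 : Nat) : Int) - 1 - (-1) + -(-1) - 1) / -(-1)).toNat = m + 1 := by
      push_cast; omega
    simp only [PySem.List.pyRange, if_neg (by norm_num : ¬ ((-1 : Int) = 0)),
      if_neg (by norm_num : ¬ ((0 : Int) < -1)), if_pos hcond, hcount]
    apply List.ext_getElem
    · simp
    · intro i h1 h2
      simp only [List.getElem_map, List.getElem_range, List.getElem_reverse, List.length_range]
      have hi : i < m + 1 := by simpa using h1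
      push_cast
      omega

theorem incGoB_eq_carry (arr : List (List Int)) (idx : List Int) (h : idx.length = arr.length) :
    incGoB arr (PySem.List.pyRange ((arr.length : Int) - 1) (-1) (-1)) idx = carryInc arr idx := by
  induction arr generalizing idx with
  | nil =>
    have h0 : idx = [] := List.eq_nil_of_length_eq_zero h
    subst h0
    rw [revRange]
    simp [incGoB, carryInc]
  | cons a rest ih =>
    cases idx with
    | nil => simp at h
    | cons j js =>
      have hjs : js.length = rest.length := by simpa using h
      rw [revRange]
      have hsplit : ((List.range ((a :: rest).length)).reverse).map (fun (k : Nat) => (k : Int)) =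
          ((List.range rest.length).reverse).map (fun (k : Nat) => ((k + 1 : Nat) : Int))
            ++ [(0 : Int)] := by
        rw [show (a :: rest).length = rest.length + 1 from rfl, List.range_succ_eq_map]
        simp [← List.map_reverse, List.map_map, Function.comp_def]
      rw [hsplit, incGoB_append, incGoB_shift, ← revRange, ih js hjs]
      simp only [carryInc]
      by_cases hR : (carryInc rest js).2 = true
      · have h00 : (0 : Int) = ((0 : Nat) : Int) := rfl
        simp only [hR, if_true, incGoB, h00, PySem.List.pyGetD_natCast, PySem.List.pySetD_natCast,
          List.getD_cons_zero, List.set_cons_zero]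
      · simp [hR]

theorem carry_spec (arr : List (List Int)) (hpos : ∀ a ∈ arr, a ≠ []) (m : Nat) (hm : m < Cn arr) :
    carryInc arr ((decodeN arr m).map (fun (j : Nat) => (j : Int))) =
      ((decodeN arr ((m + 1) % Cn arr)).map (fun (j : Nat) => (j : Int)), decide (m + 1 = Cn arr)) := by
  induction arr generalizing m with
  | nil =>
    have hm0 : m = 0 := by simpa [Cn] using hm
    subst hm0
    simp [carryInc, decodeN, Cn]
  | cons a rest ih =>
    have hane : a ≠ [] := hpos a (List.mem_cons_self)
    have hla : 0 < a.length := List.length_pos_of_ne_nil hane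
    have hCc : Cn (a :: rest) = a.length * Cn rest := by simp [Cn]
    rw [hCc] at hm
    have hCr : 0 < Cn rest := by
      rcases Nat.eq_zero_or_pos (Cn rest) with h0 | h
      · rw [h0] at hm; omega
      · exact h
    have hqr : m / Cn rest * Cn rest + m % Cn rest = m := by
      rw [mul_comm]; exact Nat.div_add_mod m (Cn rest)
    set q := m / Cn rest with hq
    set r := m % Cn rest with hr
    have hrlt : r < Cn rest := by rw [hr]; exact Nat.mod_lt _ hCr
    have hqlt : q < a.length := by rw [hq]; exact (Nat.div_lt_iff_lt_mul hCr).mpr hm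
    have hdec : decodeN (a :: rest) m = q :: decodeN rest r := by
      simp only [decodeN, ← hq, ← hr, Nat.mod_eq_of_lt hqlt]
    rw [hdec]
    simp only [List.map_cons, carryInc]
    rw [ih (fun x hx => hpos x (List.mem_cons_of_mem a hx)) r hrlt]
    rw [hCc]
    by_cases hfull : r + 1 = Cn rest
    · have hm1 : m + 1 = (q + 1) * Cn rest := by
        calc m + 1 = q * Cn rest + r + 1 := by rw [hqr]
          _ = q * Cn rest + (r + 1) := by rw [Nat.add_assoc]
          _ = q * Cn rest + Cn rest := by rw [hfull]
          _ = (q + 1) * Cn rest := by ring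
      by_cases hq1 : q + 1 < a.length
      · have hlt1 : m + 1 < a.length * Cn rest := by
          rw [hm1]; exact (Nat.mul_lt_mul_right hCr).mpr hq1
        have hmod : (m + 1) % (a.length * Cn rest) = m + 1 := Nat.mod_eq_of_lt hlt1
        have hdiv : (m + 1) / Cn rest = q + 1 := by rw [hm1, Nat.mul_div_cancel _ hCr]
        have hmodr : (m + 1) % Cn rest = 0 := by rw [hm1]; exact Nat.mul_mod_left _ _
        have hcond : ((q : Int) + 1 < PySem.List.len a) := by
          simp only [PySem.List.len]; exact_mod_cast hq1
        have hflag : m + 1 ≠ a.length * Cn rest := Nat.ne_of_lt hlt1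
        simp only [hfull, Nat.mod_self, decide_eq_true_eq, if_pos hcond, hmod,
          decodeN, hdiv, Nat.mod_eq_of_lt hq1, hmodr, List.map_cons, hflag]
        push_cast
        simp
      · have hqe : q + 1 = a.length := by omega
        have hm2 : m + 1 = a.length * Cn rest := by rw [hm1, hqe]
        have hcond : ¬ ((q : Int) + 1 < PySem.List.len a) := by
          simp only [PySem.List.len]; omega
        simp only [hfull, Nat.mod_self, decide_eq_true_eq, if_neg hcond, hm2,
          decodeN, Nat.zero_div, Nat.zero_mod, List.map_cons]
        simp
    · have hlt : r + 1 < Cn rest := by omega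
      have hm1 : m + 1 = (r + 1) + q * Cn rest := by
        calc m + 1 = q * Cn rest + r + 1 := by rw [hqr]
          _ = (r + 1) + q * Cn rest := by ring
      have hlt2 : m + 1 < a.length * Cn rest := by
        calc m + 1 = (r + 1) + q * Cn rest := hm1
          _ < Cn rest + q * Cn rest := by omega
          _ = (q + 1) * Cn rest := by ring
          _ ≤ a.length * Cn rest := Nat.mul_le_mul_right _ (Nat.succ_le_of_lt hqlt)
      have hmod : (m + 1) % (a.length * Cn rest) = m + 1 := Nat.mod_eq_of_lt hlt2
      have hdiv : (m + 1) / Cn rest = q := by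
        rw [hm1, Nat.add_mul_div_right _ _ hCr, Nat.div_eq_of_lt hlt]
        omega
      have hmodr : (m + 1) % Cn rest = r + 1 := by
        rw [hm1, Nat.add_mul_mod_self_right, Nat.mod_eq_of_lt hlt]
      have hflag : m + 1 ≠ a.length * Cn rest := Nat.ne_of_lt hlt2
      have hfl2 : decide (r + 1 = Cn rest) = false := decide_eq_false hfull
      simp only [hfl2, Bool.false_eq_true, if_false, hmod, decodeN, hdiv,
        Nat.mod_eq_of_lt hqlt, hmodr, Nat.mod_eq_of_lt hlt, List.map_cons,
        decide_eq_false hflag]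

theorem length_decodeN (arr : List (List Int)) (k : Nat) : (decodeN arr k).length = arr.length := by
  induction arr generalizing k with
  | nil => rfl
  | cons a rest ih => simp [decodeN, ih]

theorem decodeN_zero (arr : List (List Int)) : decodeN arr 0 = List.replicate arr.length 0 := by
  induction arr with
  | nil => rfl
  | cons a rest ih => simp [decodeN, ih, List.replicate_succ]

theorem count_eq_aux (arr : List (List Int)) (c : Int) :
    arr.foldl (fun c a => c * PySem.List.len a) c = c * (Cn arr : Int) := by
  induction arr generalizing c with
  | nil => simp [Cn]
  | cons a rest ih =>
    rw [List.foldl_cons, ih]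
    simp only [Cn, List.map_cons, List.prod_cons, PySem.List.len]
    push_cast
    ring

theorem count_eq (arr : List (List Int)) :
    arr.foldl (fun c a => c * PySem.List.len a) 1 = (Cn arr : Int) := by
  simpa using count_eq_aux arr 1

theorem build_eq (arr : List (List Int)) (m : Nat) :
    (PySem.List.pyRange 0 ((arr.length : Nat) : Int) 1).foldl
      (fun cur i => cur ++ [PySem.List.pyGetD (PySem.List.pyGetD arr i [])
        (PySem.List.pyGetD ((decodeN arr m).map (fun (j : Nat) => (j : Int))) i 0) 0]) [] = tupA arr m := by
  rw [PySem.List.pyRange_zero_natCast, List.foldl_map, PySem.List.foldl_append_singleton_eq_map,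
    List.nil_append]
  apply List.ext_getElem
  · simp [tupA, length_decodeN]
  · intro i h1 h2
    have hi : i < arr.length := by simpa using h1
    have hd : i < (decodeN arr m).length := by simpa [length_decodeN] using hi
    simp only [List.getElem_map, List.getElem_range, tupA, List.getElem_zipWith,
      PySem.List.pyGetD_natCast]
    rw [List.getD_eq_getElem _ _ hi, List.getD_eq_getElem _ _ (by simpa using hd),
      List.getElem_map, PySem.List.pyGetD_natCast]

theorem length_prodL (arr : List (List Int)) : (prodL arr).length = Cn arr := by
  induction arr with
  | nil => simp [prodL, Cn]
  | cons a rest ih =>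
    simp [prodL, Cn, List.length_flatMap, ih, List.map_const', List.sum_replicate, smul_eq_mul,
      List.map_cons, List.prod_cons]

theorem getD_range_self (l : List Int) :
    (List.range l.length).map (fun q => l.getD q 0) = l := by
  apply List.ext_getElem
  · simp
  · intro i h1 h2
    simp [List.getElem?_eq_getElem h2]

theorem range_mul_flatMap (A B : Nat) :
    List.range (A * B) = (List.range A).flatMap (fun q => (List.range B).map (fun r => q * B + r)) := by
  induction A with
  | zero => simp
  | succ A ih =>
    rw [Nat.succ_mul, List.range_add, ih, List.range_succ, List.flatMap_append]
    simp

theorem prodL_eq (arr : List (List Int)) :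
    (List.range (Cn arr)).map (tupA arr) = prodL arr := by
  induction arr with
  | nil =>
    simp [Cn, prodL, tupA, decodeN]
  | cons a rest ih =>
    by_cases hCr : Cn rest = 0
    · have hp : prodL rest = [] :=
        List.eq_nil_of_length_eq_zero (by rw [length_prodL, hCr])
      have hC0 : Cn (a :: rest) = 0 := by
        rw [show Cn (a :: rest) = a.length * Cn rest from by simp [Cn], hCr, Nat.mul_zero]
      rw [hC0]
      simp [prodL, hp]
    · have hCrpos : 0 < Cn rest := Nat.pos_of_ne_zero hCr
      have hC : Cn (a :: rest) = a.length * Cn rest := by simp [Cn]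
      rw [hC, range_mul_flatMap, List.map_flatMap]
      have hstep : ∀ q ∈ List.range a.length,
          ((List.range (Cn rest)).map (fun r => q * Cn rest + r)).map (tupA (a :: rest)) =
            (prodL rest).map (fun t => a.getD q 0 :: t) := by
        intro q hq
        rw [← ih, List.map_map, List.map_map]
        apply List.map_congr_left
        intro r hr
        simp only [List.mem_range] at hq hr
        have hdiv : (q * Cn rest + r) / Cn rest = q := by
          rw [add_comm, Nat.add_mul_div_right _ _ hCrpos, Nat.div_eq_of_lt hr]
          omega
        have hmod : (q * Cn rest + r) % Cn rest = r := by
          rw [add_comm, Nat.add_mul_mod_self_right, Nat.mod_eq_of_lt hr]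
        simp [tupA, decodeN, hdiv, hmod, Nat.mod_eq_of_lt hq]
      have hmid : (List.range a.length).flatMap
            (fun q => ((List.range (Cn rest)).map (fun r => q * Cn rest + r)).map (tupA (a :: rest)))
          = (List.range a.length).flatMap (fun q => (prodL rest).map (fun t => a.getD q 0 :: t)) := by
        rw [List.flatMap_def, List.flatMap_def]
        exact congrArg List.flatten (List.map_congr_left hstep)
      rw [hmid]
      have hfin : (List.range a.length).flatMap (fun q => (prodL rest).map (fun t => a.getD q 0 :: t))
          = a.flatMap (fun x => (prodL rest).map (fun t => x :: t)) := by
        conv_rhs => rw [← getD_range_self a]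
        rw [List.flatMap_map]
      rw [hfin]
      rfl

theorem setlen {α : Type} [BEq α] [LawfulBEq α] [DecidableEq α] (L : List α) :
    (PySem.Set.ofList L).length = L.toFinset.card := by
  have h1 : (PySem.Set.ofList L).toFinset = L.toFinset := by
    ext x
    simp [List.mem_toFinset, PySem.Set.mem_ofList]
  rw [← h1, List.toFinset_card_of_nodup (PySem.Set.nodup_ofList L)]

theorem cons_pair_injective : Function.Injective (fun p : Int × List Int => p.1 :: p.2) := by
  intro p q h
  simp only [List.cons.injEq] at h
  exact Prod.ext h.1 h.2

theorem cardProd (arr : List (List Int)) :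
    (prodL arr).toFinset.card = (arr.map (fun a => a.toFinset.card)).prod := by
  induction arr with
  | nil => simp [prodL]
  | cons a rest ih =>
    have himg : (prodL (a :: rest)).toFinset =
        (a.toFinset ×ˢ (prodL rest).toFinset).image (fun p => p.1 :: p.2) := by
      ext t
      simp only [prodL, List.mem_toFinset, List.mem_flatMap, List.mem_map, Finset.mem_image,
        Finset.mem_product, Prod.exists]
      constructor
      · rintro ⟨x, hx, s, hs, rfl⟩
        exact ⟨x, s, ⟨hx, hs⟩, rfl⟩
      · rintro ⟨x, s, ⟨hx, hs⟩, rfl⟩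
        exact ⟨x, hx, s, hs, rfl⟩
    rw [himg, Finset.card_image_of_injective _ cons_pair_injective, Finset.card_product, ih]
    simp

theorem alt_eq_aux (arr : List (List Int)) (c : Int) :
    arr.foldl (fun result a => result * PySem.Set.len (PySem.Set.ofList a)) c =
      c * ((arr.map (fun a => a.toFinset.card)).prod : Int) := by
  induction arr generalizing c with
  | nil => simp
  | cons a rest ih =>
    rw [List.foldl_cons, ih]
    simp only [List.map_cons, List.prod_cons, PySem.Set.len]
    rw [setlen]
    ring

theorem alt_eq (arr : List (List Int)) :
    solve_alt arr = ((arr.map (fun a => a.toFinset.card)).prod : Int) := by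
  simpa [solve_alt] using alt_eq_aux arr 1

theorem loop_inv (arr : List (List Int)) (m : Nat) (hm : m ≤ Cn arr) :
    ((List.range m).map (fun (k : Nat) => (k : Int))).foldl
      (fun (st : PySem.Set (List Int) × List Int) _ =>
        let cur := (PySem.List.pyRange 0 ((arr.length : Nat) : Int) 1).foldl
          (fun cur i => cur ++ [PySem.List.pyGetD (PySem.List.pyGetD arr i [])
            (PySem.List.pyGetD st.2 i 0) 0]) []
        (PySem.Set.add st.1 cur,
          incGo arr (PySem.List.pyRange (((arr.length : Nat) : Int) - 1) (-1) (-1)) st.2))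
      ((PySem.Set.empty : PySem.Set (List Int)), List.replicate arr.length (0 : Int))
    = (PySem.Set.ofList ((List.range m).map (tupA arr)),
        (decodeN arr (m % Cn arr)).map (fun (j : Nat) => (j : Int))) := by
  induction m with
  | zero =>
    simp only [List.range_zero, List.map_nil, List.foldl_nil, Nat.zero_mod, decodeN_zero,
      List.map_replicate, Nat.cast_zero]
    rfl
  | succ m ih =>
    have hmlt : m < Cn arr := hm
    have hCpos : 0 < Cn arr := Nat.lt_of_le_of_lt (Nat.zero_le m) hmlt
    have hpos : ∀ a ∈ arr, a ≠ [] := by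
      intro a ha hnil
      have h0 : (0 : Nat) ∈ arr.map List.length := by
        exact List.mem_map.mpr ⟨a, ha, by simp [hnil]⟩
      have := List.prod_eq_zero h0
      simp only [Cn] at hCpos
      omega
    rw [List.range_succ, List.map_append, List.foldl_append, ih (Nat.le_of_lt hmlt)]
    simp only [List.map_cons, List.map_nil, List.foldl_cons, List.foldl_nil,
      Nat.mod_eq_of_lt hmlt]
    rw [build_eq, incGo_eq_fst,
      incGoB_eq_carry arr _ (by simp [length_decodeN]),
      carry_spec arr hpos m hmlt]
    rw [← PySem.Set.ofList_append_singleton]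
    simp

theorem solve_eq (arr : List (List Int)) : solve arr = solve_alt arr := by
  simp only [solve]
  rw [count_eq, PySem.List.pyRange_zero_natCast (Cn arr)]
  rw [loop_inv arr (Cn arr) (Nat.le_refl _)]
  rw [prodL_eq, setlen, cardProd, alt_eq]
  push_cast [List.map_map]
  rfl

-- ===== VERDICT (by name: the statement is the Claim_ definition above) =====
theorem solve_spec : Claim_equal_solve := by
  intro arr _
  unfold Spec_solve
  exact solve_eq arr
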